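-- pv_equiv track=rewrite | github.com/pypi-data/pypi-mirror-395 | packages/jjf-survey-analytics/jjf_survey_analytics-1.5.3-py3-none-any.whl/services/aggregate_report_builder.py | _build_breakdown
-- ===== SOURCE A (Python) =====
-- from typing import Any, Dict, List, Optional
--
-- def _build_breakdown(
--
--     ceo_data: List[Dict[str, Any]],
--     tech_data: List[Dict[str, Any]],
--     staff_data: List[Dict[str, Any]],
-- ) -> Dict[str, Any]:
--     """
--     Build aggregate breakdown by survey type.
--
--     Args:
--         ceo_data: CEO tab data
--         tech_data: Tech tab data
--         staff_data: Staff tab data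
--
--     Returns:
--         Dictionary containing breakdown by survey type
--     """
--     return {
--         "by_survey_type": {
--             "CEO": {
--                 "completed": len([r for r in ceo_data if r.get("Date")]),
--                 "pending": len([r for r in ceo_data if not r.get("Date")]),
--                 "total_responses": sum(
--                     len([k for k in r.keys() if k.startswith("C-")])
--                     for r in ceo_data
--                     if r.get("Date")
--                 ),
--             },
--             "Tech Lead": {
--                 "completed": len([r for r in tech_data if r.get("Date")]),
--                 "pending": len([r for r in tech_data if not r.get("Date")]),
--                 "total_responses": sum(
--                     len([k for k in r.keys() if k.startswith("TL-")])
--                     for r in tech_data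
--                     if r.get("Date")
--                 ),
--             },
--             "Staff": {
--                 "completed": len([r for r in staff_data if r.get("Date")]),
--                 "pending": len([r for r in staff_data if not r.get("Date")]),
--                 "total_responses": sum(
--                     len([k for k in r.keys() if k.startswith("S-")])
--                     for r in staff_data
--                     if r.get("Date")
--                 ),
--             },
--         }
--     }
-- ===== SOURCE B (Python) =====
-- def _build_breakdown(ceo_data, tech_data, staff_data):
--     """Same aggregate breakdown, built by a single pass per list driven by a table."""
--
--     def tally(data, prefix):
--         completed = pending = total = 0
--         for r in data:
--             if r.get("Date"):
--                 completed += 1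
--                 for k in r.keys():
--                     if k.startswith(prefix):
--                         total += 1
--             else:
--                 pending += 1
--         return completed, pending, total
--
--     by_type = {}
--     for label, data, prefix in (
--         ("CEO", ceo_data, "C-"),
--         ("Tech Lead", tech_data, "TL-"),
--         ("Staff", staff_data, "S-"),
--     ):
--         c, p, t = tally(data, prefix)
--         by_type[label] = {"completed": c, "pending": p, "total_responses": t}
--     return {"by_survey_type": by_type}
-- ===== Notes on version B (the rewrite author's own statement) =====
-- stated objective: simpler
-- what changed: Replaces A's nine independent comprehension/sum scans with one table-driven loop over (label, data, prefix) triples and a helper making a single pass per list that maintains completed/pending/total counters.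
import Mathlib
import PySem

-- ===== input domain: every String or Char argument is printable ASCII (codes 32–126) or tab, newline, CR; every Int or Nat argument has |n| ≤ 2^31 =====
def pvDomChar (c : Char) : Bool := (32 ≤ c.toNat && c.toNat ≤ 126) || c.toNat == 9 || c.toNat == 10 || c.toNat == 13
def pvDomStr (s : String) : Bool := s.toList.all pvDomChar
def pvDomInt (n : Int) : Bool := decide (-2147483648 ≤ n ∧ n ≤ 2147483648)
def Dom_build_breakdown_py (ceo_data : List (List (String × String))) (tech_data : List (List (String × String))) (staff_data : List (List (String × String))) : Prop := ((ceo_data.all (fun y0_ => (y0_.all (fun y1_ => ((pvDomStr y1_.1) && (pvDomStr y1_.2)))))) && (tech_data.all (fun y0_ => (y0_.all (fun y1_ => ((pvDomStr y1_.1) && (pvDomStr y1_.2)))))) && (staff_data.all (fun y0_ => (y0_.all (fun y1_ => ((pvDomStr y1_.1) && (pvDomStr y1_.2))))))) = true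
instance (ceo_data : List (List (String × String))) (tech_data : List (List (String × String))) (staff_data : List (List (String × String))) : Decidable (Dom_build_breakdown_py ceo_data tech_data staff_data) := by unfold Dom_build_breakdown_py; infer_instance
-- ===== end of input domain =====

-- ===== PORT A =====
-- B changes only the decomposition: one table-driven pass per list instead of nine comprehension scans; same values.
-- Rows are Python dicts: each List (String × String) is read through PySem.Dict.ofList (duplicate keys collapse as in dict literals).

-- r.get("Date") truthiness: missing key (None) and "" are falsy, any other string truthy
def pvTruthyDate (r : List (String × String)) : Bool :=
  ((PySem.Dict.ofList r).getD "Date" "") != ""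

-- len([k for k in r.keys() if k.startswith(pre)])
def pvKeyCount (pre : String) (r : List (String × String)) : Int :=
  (((PySem.Dict.ofList r).keys.filter (fun k => PySem.Str.startswith k pre)).length : Int)

def build_breakdown_py (ceo_data : List (List (String × String))) (tech_data : List (List (String × String))) (staff_data : List (List (String × String))) : List (String × List (String × List (String × Int))) :=
  [("by_survey_type",
    [("CEO",
      [("completed", ((ceo_data.filter (fun r => pvTruthyDate r)).length : Int)),
       ("pending", ((ceo_data.filter (fun r => !pvTruthyDate r)).length : Int)),
       ("total_responses", ((ceo_data.filter (fun r => pvTruthyDate r)).map (pvKeyCount "C-")).sum)]),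
     ("Tech Lead",
      [("completed", ((tech_data.filter (fun r => pvTruthyDate r)).length : Int)),
       ("pending", ((tech_data.filter (fun r => !pvTruthyDate r)).length : Int)),
       ("total_responses", ((tech_data.filter (fun r => pvTruthyDate r)).map (pvKeyCount "TL-")).sum)]),
     ("Staff",
      [("completed", ((staff_data.filter (fun r => pvTruthyDate r)).length : Int)),
       ("pending", ((staff_data.filter (fun r => !pvTruthyDate r)).length : Int)),
       ("total_responses", ((staff_data.filter (fun r => pvTruthyDate r)).map (pvKeyCount "S-")).sum)])])]

-- ===== PORT B =====
-- tally(data, prefix): single pass keeping (completed, pending, total) counters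
def pvTally (data : List (List (String × String))) (pre : String) : Int × Int × Int :=
  data.foldl (fun s r =>
    if pvTruthyDate r then
      (s.1 + 1, s.2.1,
       (PySem.Dict.ofList r).keys.foldl
         (fun t k => if PySem.Str.startswith k pre then t + 1 else t) s.2.2)
    else (s.1, s.2.1 + 1, s.2.2)) (0, 0, 0)

def build_breakdown_py_alt (ceo_data : List (List (String × String))) (tech_data : List (List (String × String))) (staff_data : List (List (String × String))) : List (String × List (String × List (String × Int))) :=
  [("by_survey_type",
    ([("CEO", (ceo_data, "C-")), ("Tech Lead", (tech_data, "TL-")), ("Staff", (staff_data, "S-"))].map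
      (fun g =>
        let s := pvTally g.2.1 g.2.2
        (g.1, [("completed", s.1), ("pending", s.2.1), ("total_responses", s.2.2)]))))]

-- ===== PRECONDITION & SPEC =====
def Spec_build_breakdown_py (ceo_data : List (List (String × String))) (tech_data : List (List (String × String))) (staff_data : List (List (String × String))) (out : List (String × List (String × List (String × Int)))) : Prop := out = build_breakdown_py_alt ceo_data tech_data staff_data
instance (ceo_data : List (List (String × String))) (tech_data : List (List (String × String))) (staff_data : List (List (String × String))) (out : List (String × List (String × List (String × Int)))) : Decidable (Spec_build_breakdown_py ceo_data tech_data staff_data out) := by unfold Spec_build_breakdown_py; infer_instance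

-- ===== CLAIM (what is proved, stated in full; the proofs are below) =====
def Claim_equal_build_breakdown_py : Prop := ∀ (ceo_data : List (List (String × String))) (tech_data : List (List (String × String))) (staff_data : List (List (String × String))), Dom_build_breakdown_py ceo_data tech_data staff_data → Spec_build_breakdown_py ceo_data tech_data staff_data (build_breakdown_py ceo_data tech_data staff_data)

-- ===== LEMMAS AND PROOFS =====

-- the single pass computes A's three per-group aggregates
theorem pvTally_spec (data : List (List (String × String))) (pre : String) :
    pvTally data pre =
      (((data.filter (fun r => pvTruthyDate r)).length : Int),
       ((data.filter (fun r => !pvTruthyDate r)).length : Int),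
       ((data.filter (fun r => pvTruthyDate r)).map (pvKeyCount pre)).sum) := by
  suffices h : ∀ (a b c : Int),
      data.foldl (fun s r =>
        if pvTruthyDate r then
          (s.1 + 1, s.2.1,
           (PySem.Dict.ofList r).keys.foldl
             (fun t k => if PySem.Str.startswith k pre then t + 1 else t) s.2.2)
        else (s.1, s.2.1 + 1, s.2.2)) (a, b, c) =
      (a + ((data.filter (fun r => pvTruthyDate r)).length : Int),
       b + ((data.filter (fun r => !pvTruthyDate r)).length : Int),
       c + ((data.filter (fun r => pvTruthyDate r)).map (pvKeyCount pre)).sum) by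
    have := h 0 0 0
    simpa [pvTally] using this
  induction data with
  | nil => intro a b c; simp
  | cons r rest ih =>
    intro a b c
    by_cases hr : pvTruthyDate r
    · simp only [List.foldl_cons, hr, if_pos, List.filter_cons]
      rw [ih, PySem.List.foldl_count_if]
      simp [pvKeyCount]
      refine ⟨by ring, by rw [List.countP_eq_length_filter]; ring⟩
    · simp only [List.foldl_cons, hr, List.filter_cons]
      rw [ih]
      simp
      ring

-- ===== VERDICT (by name: the statement is the Claim_ definition above) =====
theorem build_breakdown_py_spec : Claim_equal_build_breakdown_py := by
  intro ceo tech staff _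
  show build_breakdown_py ceo tech staff = build_breakdown_py_alt ceo tech staff
  simp [build_breakdown_py, build_breakdown_py_alt, pvTally_spec]
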